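-- pv_equiv track=rewrite | github.com/CIEMAT-Neutrino/SOLAR | lib/io_functions.py | get_simple_names
-- ===== SOURCE A (Python) =====
-- def get_simple_names(names: list[str], debug: bool = False) -> dict:
--     simple_names = dict()
--     basic_names = ["Ar42", "Ar39", "Kr85", "Po210", "Rn22"]
--     for name in names:
--         if "LAr" in name:
--             for basic_name in basic_names:
--                 if basic_name in name:
--                     simple_names[name] = basic_name
--                     if basic_name == "Rn22":
--                         simple_names[name] = "Rn22X"
--             if "K42" in name:
--                 simple_names[name] = "Ar42"
--
--         elif "Gamma" in name:
--             simple_names[name] = "Gamma"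
--         elif "Neutron" in name:
--             simple_names[name] = "Neutron"
--         elif "CPA" in name:
--             simple_names[name] = "CPA"
--         elif "Cathode" in name:
--             simple_names[name] = "CPA"
--         elif "CRP" in name:
--             simple_names[name] = "APA"
--         elif "APA" in name:
--             simple_names[name] = "APA"
--         elif "PDS" in name:
--             simple_names[name] = "PDS"
--         elif "hep" in name.lower():
--             simple_names[name] = "HEP"
--         elif "8" in name.lower():
--             simple_names[name] = "8B"
--         else:
--             simple_names[name] = name
--
--     return simple_names
-- ===== SOURCE B (Python) =====
-- # Rule-major re-implementation: instead of classifying each name with a branch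
-- # cascade, sweep each rule over the whole (deduplicated) name list in staged
-- # passes, then rebuild the dict in first-occurrence order.
--
-- BASIC_NAMES = ["Ar42", "Ar39", "Kr85", "Po210", "Rn22"]
-- RULES = [("Gamma", "Gamma"), ("Neutron", "Neutron"), ("CPA", "CPA"),
--          ("Cathode", "CPA"), ("CRP", "APA"), ("APA", "APA"), ("PDS", "PDS")]
--
--
-- def _assign(order):
--     lar = [n for n in order if "LAr" in n]
--     rest = [n for n in order if "LAr" not in n]
--     assigned = {}
--     # pass per basic name over the LAr names; later basics overwrite earlier
--     for basic in BASIC_NAMES: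
--         lab = "Rn22X" if basic == "Rn22" else basic
--         for n in lar:
--             if basic in n:
--                 assigned[n] = lab
--     # K42 override pass
--     for n in lar:
--         if "K42" in n:
--             assigned[n] = "Ar42"
--     # pass per rule over the non-LAr names; earlier rules claim names first
--     for sub, lab in RULES:
--         for n in rest:
--             if n not in assigned and sub in n:
--                 assigned[n] = lab
--     # default pass for the still-unclaimed non-LAr names
--     for n in rest:
--         if n not in assigned:
--             low = n.lower()
--             if "hep" in low:
--                 assigned[n] = "HEP"
--             elif "8" in low:
--                 assigned[n] = "8B"
--             else:
--                 assigned[n] = n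
--     return assigned
--
--
-- def get_simple_names(names: list[str], debug: bool = False) -> dict:
--     order = list(dict.fromkeys(names))
--     assigned = _assign(order)
--     return {n: assigned[n] for n in order if n in assigned}
-- ===== Notes on version B (the rewrite author's own statement) =====
-- stated objective: alternative
-- what changed: A classifies name-by-name with one elif cascade inside a single loop; B inverts the loop nesting: it deduplicates the names first, then makes one staged pass per rule (each basic name, the K42 override, each substring rule, then a defaults pass) over the whole list, and finally rebuilds the dict in first-occurrence order from the assignment table.
import Mathlib
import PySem

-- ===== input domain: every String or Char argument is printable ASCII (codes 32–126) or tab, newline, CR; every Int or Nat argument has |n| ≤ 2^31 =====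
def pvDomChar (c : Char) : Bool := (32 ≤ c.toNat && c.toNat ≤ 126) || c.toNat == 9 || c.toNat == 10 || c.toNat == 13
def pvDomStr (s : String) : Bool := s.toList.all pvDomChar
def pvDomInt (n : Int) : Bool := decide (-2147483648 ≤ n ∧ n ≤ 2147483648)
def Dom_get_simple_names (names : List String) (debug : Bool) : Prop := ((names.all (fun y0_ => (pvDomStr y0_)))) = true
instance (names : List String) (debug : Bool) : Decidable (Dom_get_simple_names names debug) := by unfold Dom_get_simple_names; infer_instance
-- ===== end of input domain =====

-- B inverts A's loop nesting: staged passes (one per rule) over the deduplicated name list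
-- filling an assignment table, then the dict is rebuilt in first-occurrence order (alternative).

-- ===== PORT A =====
def pvBasicNames : List String := ["Ar42", "Ar39", "Kr85", "Po210", "Rn22"]

-- one iteration of A's 'for name in names' body, step for step
def pvStepA (d : PySem.Dict String String) (name : String) : PySem.Dict String String :=
  if PySem.Str.isIn "LAr" name then
    let d := pvBasicNames.foldl (fun d basic_name =>
      if PySem.Str.isIn basic_name name then
        let d := d.insert name basic_name
        if basic_name == "Rn22" then d.insert name "Rn22X" else d
      else d) d
    if PySem.Str.isIn "K42" name then d.insert name "Ar42" else d
  else if PySem.Str.isIn "Gamma" name then d.insert name "Gamma"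
  else if PySem.Str.isIn "Neutron" name then d.insert name "Neutron"
  else if PySem.Str.isIn "CPA" name then d.insert name "CPA"
  else if PySem.Str.isIn "Cathode" name then d.insert name "CPA"
  else if PySem.Str.isIn "CRP" name then d.insert name "APA"
  else if PySem.Str.isIn "APA" name then d.insert name "APA"
  else if PySem.Str.isIn "PDS" name then d.insert name "PDS"
  else if PySem.Str.isIn "hep" (PySem.Str.lower name) then d.insert name "HEP"
  else if PySem.Str.isIn "8" (PySem.Str.lower name) then d.insert name "8B"
  else d.insert name name

def get_simple_names (names : List String) (debug : Bool) : List (String × String) :=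
  (names.foldl pvStepA PySem.Dict.empty).items

-- ===== PORT B =====
def pvRules : List (String × String) :=
  [("Gamma", "Gamma"), ("Neutron", "Neutron"), ("CPA", "CPA"),
   ("Cathode", "CPA"), ("CRP", "APA"), ("APA", "APA"), ("PDS", "PDS")]

-- Source B's own list of basic names
def pvBasicNamesB : List String := ["Ar42", "Ar39", "Kr85", "Po210", "Rn22"]

-- Source B's _assign, pass by pass: one pass per basic name over the LAr names …
def pvAssignBasics (lar : List String) : PySem.Dict String String :=
  pvBasicNamesB.foldl (fun d basic =>
    lar.foldl (fun d n =>
      if PySem.Str.isIn basic n then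
        d.insert n (if basic == "Rn22" then "Rn22X" else basic)
      else d) d)
    PySem.Dict.empty

-- … then the K42 override pass …
def pvAssignK42 (lar : List String) : PySem.Dict String String :=
  lar.foldl (fun d n => if PySem.Str.isIn "K42" n then d.insert n "Ar42" else d)
    (pvAssignBasics lar)

-- … then one pass per (substring, label) rule over the non-LAr names …
def pvAssignRules (lar rest : List String) : PySem.Dict String String :=
  pvRules.foldl (fun d r =>
    rest.foldl (fun d n =>
      if !d.contains n && PySem.Str.isIn r.1 n then d.insert n r.2 else d) d)
    (pvAssignK42 lar)

-- … and finally the defaults pass for the still-unclaimed non-LAr names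
def pvAssignDefault (lar rest : List String) : PySem.Dict String String :=
  rest.foldl (fun d n =>
    if !d.contains n then
      if PySem.Str.isIn "hep" (PySem.Str.lower n) then d.insert n "HEP"
      else if PySem.Str.isIn "8" (PySem.Str.lower n) then d.insert n "8B"
      else d.insert n n
    else d)
    (pvAssignRules lar rest)

def pvAssign (order : List String) : PySem.Dict String String :=
  pvAssignDefault (order.filter (fun n => PySem.Str.isIn "LAr" n))
    (order.filter (fun n => !PySem.Str.isIn "LAr" n))

def get_simple_names_alt (names : List String) (debug : Bool) : List (String × String) :=
  ((PySem.List.dedup names).foldl (fun d n =>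
    match (pvAssign (PySem.List.dedup names)).get? n with
    | some v => d.insert n v
    | none => d) PySem.Dict.empty).items

-- ===== PRECONDITION & SPEC =====
def Spec_get_simple_names (names : List String) (debug : Bool) (out : List (String × String)) : Prop := out = get_simple_names_alt names debug
instance (names : List String) (debug : Bool) (out : List (String × String)) : Decidable (Spec_get_simple_names names debug out) := by unfold Spec_get_simple_names; infer_instance

-- ===== CLAIM (what is proved, stated in full; the proofs are below) =====
def Claim_equal_get_simple_names : Prop := ∀ (names : List String) (debug : Bool), Dom_get_simple_names names debug → Spec_get_simple_names names debug (get_simple_names names debug)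

-- ===== LEMMAS AND PROOFS =====

-- the label A's branch cascade computes for one name (none = the name never enters the dict)
def pvLabel (n : String) : Option String :=
  if PySem.Str.isIn "LAr" n then
    if PySem.Str.isIn "K42" n then some "Ar42"
    else if PySem.Str.isIn "Rn22" n then some "Rn22X"
    else if PySem.Str.isIn "Po210" n then some "Po210"
    else if PySem.Str.isIn "Kr85" n then some "Kr85"
    else if PySem.Str.isIn "Ar39" n then some "Ar39"
    else if PySem.Str.isIn "Ar42" n then some "Ar42"
    else none
  else if PySem.Str.isIn "Gamma" n then some "Gamma"
  else if PySem.Str.isIn "Neutron" n then some "Neutron"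
  else if PySem.Str.isIn "CPA" n then some "CPA"
  else if PySem.Str.isIn "Cathode" n then some "CPA"
  else if PySem.Str.isIn "CRP" n then some "APA"
  else if PySem.Str.isIn "APA" n then some "APA"
  else if PySem.Str.isIn "PDS" n then some "PDS"
  else if PySem.Str.isIn "hep" (PySem.Str.lower n) then some "HEP"
  else if PySem.Str.isIn "8" (PySem.Str.lower n) then some "8B"
  else some n

-- what one non-LAr name gets in B's defaults pass
def pvDefault (n : String) : String :=
  if PySem.Str.isIn "hep" (PySem.Str.lower n) then "HEP"
  else if PySem.Str.isIn "8" (PySem.Str.lower n) then "8B"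
  else n

-- the canonical result of inserting (n, f n) for the not-yet-seen names, in order
def canonGo (f : String → Option String) (seen : List String) : List String → List (String × String)
  | [] => []
  | n :: ns =>
    if n ∈ seen then canonGo f seen ns
    else match f n with
      | some v => (n, v) :: canonGo f (seen ++ [n]) ns
      | none => canonGo f (seen ++ [n]) ns

theorem pvStepA_eq_label (d : PySem.Dict String String) (name : String) :
    pvStepA d name = (match pvLabel name with
                      | some lab => d.insert name lab
                      | none => d) := by
  unfold pvStepA pvLabel pvBasicNames
  by_cases hL : PySem.Str.isIn "LAr" name = true
  · simp only [hL, if_true, List.foldl]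
    by_cases hK : PySem.Str.isIn "K42" name = true <;>
    by_cases h1 : PySem.Str.isIn "Ar42" name = true <;>
    by_cases h2 : PySem.Str.isIn "Ar39" name = true <;>
    by_cases h3 : PySem.Str.isIn "Kr85" name = true <;>
    by_cases h4 : PySem.Str.isIn "Po210" name = true <;>
    by_cases h5 : PySem.Str.isIn "Rn22" name = true <;>
    simp_all [PySem.Dict.insert_insert_self]
  · simp only [hL, if_false, Bool.false_eq_true]
    by_cases hG : PySem.Str.isIn "Gamma" name = true
    · simp_all
    by_cases hN : PySem.Str.isIn "Neutron" name = true
    · simp_all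
    by_cases hC : PySem.Str.isIn "CPA" name = true
    · simp_all
    by_cases hCa : PySem.Str.isIn "Cathode" name = true
    · simp_all
    by_cases hCr : PySem.Str.isIn "CRP" name = true
    · simp_all
    by_cases hA : PySem.Str.isIn "APA" name = true
    · simp_all
    by_cases hP : PySem.Str.isIn "PDS" name = true
    · simp_all
    by_cases hH : PySem.Str.isIn "hep" (PySem.Str.lower name) = true
    · simp_all
    by_cases h8 : PySem.Str.isIn "8" (PySem.Str.lower name) = true <;>
    simp_all

-- the canonical result of inserting (n, f n) for the not-yet-seen names, in order

theorem insert_same_eq (d : PySem.Dict String String) (n v : String)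
    (hnd : d.keys.Nodup) (h : d.get? n = some v) : d.insert n v = d := by
  apply PySem.Dict.ext
  have hc : d.contains n = true := by rw [PySem.Dict.contains_eq_isSome_get?, h]; rfl
  rw [PySem.Dict.items_insert_of_contains _ _ hc]
  have key : ∀ p ∈ d.items, (if p.1 == n then (n, v) else p) = p := by
    intro p hp
    by_cases hpn : p.1 = n
    · obtain ⟨k, w⟩ := p
      simp only at hpn
      subst hpn
      have h2 : d.get? k = some w := PySem.Dict.get?_of_mem_items _ hp hnd
      rw [h] at h2
      simp_all
    · simp [hpn]
  simpa using List.map_congr_left key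

theorem items_foldl_upd (f : String → Option String) :
    ∀ (ns : List String) (d : PySem.Dict String String) (seen : List String),
      d.keys.Nodup →
      (∀ m : String, (f m).isSome → (m ∈ seen ↔ d.contains m = true)) →
      (∀ k v, d.get? k = some v → f k = some v) →
      (ns.foldl (fun d n => match f n with
        | some v => d.insert n v
        | none => d) d).items = d.items ++ canonGo f seen ns := by
  intro ns
  induction ns with
  | nil => intro d seen _ _ _; simp [canonGo]
  | cons n ns ih =>
    intro d seen hnd hseen hcons
    simp only [List.foldl_cons, canonGo]
    cases hfn : f n with
    | none =>
      simp only [hfn]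
      have hinv : ∀ m : String, (f m).isSome → (m ∈ seen ++ [n] ↔ d.contains m = true) := by
        intro m hm
        have hmn : m ≠ n := by rintro rfl; rw [hfn] at hm; simp at hm
        simp only [List.mem_append, List.mem_singleton, hmn, or_false]
        exact hseen m hm
      by_cases hs : n ∈ seen
      · simp only [hs, if_true]
        exact ih d seen hnd hseen hcons
      · simp only [hs, if_false]
        exact ih d (seen ++ [n]) hnd hinv hcons
    | some v =>
      simp only [hfn]
      by_cases hs : n ∈ seen
      · have hc : d.contains n = true := (hseen n (by simp [hfn])).mp hs
        rw [PySem.Dict.contains_eq_isSome_get?] at hc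
        obtain ⟨w, hw⟩ := Option.isSome_iff_exists.mp hc
        have hfw := hcons n w hw
        rw [hfn] at hfw
        have hwv : w = v := by injection hfw with h'; exact h'.symm
        subst hwv
        rw [insert_same_eq d n w hnd hw]
        simp only [hs, if_true]
        exact ih d seen hnd hseen hcons
      · have hc : d.contains n = false := by
          cases h' : d.contains n
          · rfl
          · exact absurd ((hseen n (by simp [hfn])).mpr h') hs
        have hitems : (d.insert n v).items = d.items ++ [(n, v)] :=
          PySem.Dict.items_insert_of_not_contains _ _ hc
        have hnd' : (d.insert n v).keys.Nodup := PySem.Dict.nodup_keys_insert _ _ _ hnd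
        have hinv : ∀ m : String, (f m).isSome →
            (m ∈ seen ++ [n] ↔ (d.insert n v).contains m = true) := by
          intro m hm
          rw [PySem.Dict.contains_insert]
          by_cases hmn : m = n
          · subst hmn; simp
          · simp [List.mem_append, hmn, hseen m hm]
        have hcons' : ∀ k w, (d.insert n v).get? k = some w → f k = some w := by
          intro k w hk
          rw [PySem.Dict.get?_insert] at hk
          by_cases hkn : k = n
          · subst hkn; simp only [if_pos rfl] at hk
            rw [hfn]; injection hk with h'; rw [h']
          · rw [if_neg hkn] at hk; exact hcons k w hk
        rw [ih (d.insert n v) (seen ++ [n]) hnd' hinv hcons', hitems]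
        simp [hs, List.append_assoc]

theorem set_update_append (ns : List String) : ∀ s : List String,
    ∃ t, PySem.Set.update s ns = s ++ t := by
  induction ns with
  | nil => intro s; exact ⟨[], by simp [PySem.Set.update]⟩
  | cons n ns ih =>
    intro s
    have hstep : PySem.Set.update s (n :: ns) = PySem.Set.update (PySem.Set.add s n) ns := by
      simp [PySem.Set.update]
    by_cases hc : n ∈ s
    · have : PySem.Set.add s n = s := by simp [PySem.Set.add, PySem.Set.contains, hc]
      obtain ⟨t, ht⟩ := ih s
      exact ⟨t, by rw [hstep, this, ht]⟩
    · have : PySem.Set.add s n = s ++ [n] := by simp [PySem.Set.add, PySem.Set.contains, hc]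
      obtain ⟨t, ht⟩ := ih (s ++ [n])
      exact ⟨n :: t, by rw [hstep, this, ht]; simp⟩

theorem canonGo_eq (f : String → Option String) :
    ∀ (ns seen : List String),
      canonGo f seen ns =
        ((PySem.Set.update seen ns).drop seen.length).filterMap
          (fun n => (f n).map (fun v => (n, v))) := by
  intro ns
  induction ns with
  | nil => intro seen; simp [canonGo, PySem.Set.update, List.drop_length]
  | cons n ns ih =>
    intro seen
    have hstep : PySem.Set.update seen (n :: ns) = PySem.Set.update (PySem.Set.add seen n) ns := by
      simp [PySem.Set.update]
    by_cases hs : n ∈ seen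
    · have hadd : PySem.Set.add seen n = seen := by
        simp [PySem.Set.add, PySem.Set.contains, hs]
      simp only [canonGo, hs, if_true, hstep, hadd]
      exact ih seen
    · have hadd : PySem.Set.add seen n = seen ++ [n] := by
        simp [PySem.Set.add, PySem.Set.contains, hs]
      obtain ⟨t, ht⟩ := set_update_append ns (seen ++ [n])
      have hdrop1 : (PySem.Set.update (seen ++ [n]) ns).drop seen.length = n :: t := by
        rw [ht, List.append_assoc, List.drop_left]
        rfl
      have hdrop2 : (PySem.Set.update (seen ++ [n]) ns).drop (seen ++ [n]).length = t := by
        rw [ht, List.drop_left]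
      have ih' := ih (seen ++ [n])
      rw [hdrop2] at ih'
      simp only [canonGo, hs, if_false, hstep, hadd, hdrop1]
      cases hfn : f n with
      | some v => simp [List.filterMap_cons, hfn, ih']
      | none => simp [List.filterMap_cons, hfn, ih']

theorem get?_pass_uncond (b lab : String) :
    ∀ (ms : List String) (d : PySem.Dict String String) (n : String),
      (ms.foldl (fun d m => if PySem.Str.isIn b m then d.insert m lab else d) d).get? n
        = if n ∈ ms ∧ PySem.Str.isIn b n = true then some lab else d.get? n := by
  intro ms
  induction ms with
  | nil => intro d n; simp
  | cons m ms ih =>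
    intro d n
    simp only [List.foldl_cons]
    rw [ih]
    by_cases hm : PySem.Str.isIn b m = true <;>
      by_cases hnm : n = m <;>
        simp_all [PySem.Dict.get?_insert, List.mem_cons] <;>
          split_ifs <;> simp_all

theorem get?_pass_guard (sub lab : String) :
    ∀ (ms : List String) (d : PySem.Dict String String) (n : String), ms.Nodup →
      (ms.foldl (fun d m =>
          if !d.contains m && PySem.Str.isIn sub m then d.insert m lab else d) d).get? n
        = if n ∈ ms ∧ d.contains n = false ∧ PySem.Str.isIn sub n = true then some lab
          else d.get? n := by
  intro ms
  induction ms with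
  | nil => intro d n _; simp
  | cons m ms ih =>
    intro d n hnd
    obtain ⟨hm, hnd'⟩ := List.nodup_cons.mp hnd
    simp only [List.foldl_cons]
    by_cases hnm : n = m
    · subst hnm
      by_cases hc : (!d.contains n && PySem.Str.isIn sub n) = true
      · simp only [hc, if_true]
        rw [ih _ _ hnd']
        obtain ⟨hc1, hc2⟩ := Bool.and_eq_true_iff.mp hc
        have hcf : d.contains n = false := by
          cases h' : d.contains n; rfl; rw [h'] at hc1; simp at hc1
        rw [if_neg (show ¬(n ∈ ms ∧ (d.insert n lab).contains n = false ∧ PySem.Str.isIn sub n = true) from fun h => hm h.1),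
          if_pos (show n ∈ n :: ms ∧ d.contains n = false ∧ PySem.Str.isIn sub n = true from ⟨List.mem_cons_self, hcf, hc2⟩),
          PySem.Dict.get?_insert_self]
      · rw [if_neg hc]
        rw [ih _ _ hnd']
        have hng : ¬(d.contains n = false ∧ PySem.Str.isIn sub n = true) := by
          intro ⟨h1, h2⟩; exact hc (by rw [h1, h2]; rfl)
        rw [if_neg (show ¬(n ∈ ms ∧ d.contains n = false ∧ PySem.Str.isIn sub n = true) from fun h => hm h.1),
          if_neg (show ¬(n ∈ n :: ms ∧ d.contains n = false ∧ PySem.Str.isIn sub n = true) from fun h => hng h.2)]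
    · by_cases hc : (!d.contains m && PySem.Str.isIn sub m) = true
      · simp only [hc, if_true]
        rw [ih _ _ hnd']
        rw [PySem.Dict.get?_insert]
        have hcn : (d.insert m lab).contains n = d.contains n := by
          rw [PySem.Dict.contains_insert]
          simp [hnm]
        rw [hcn, if_neg hnm]
        simp only [List.mem_cons, hnm, false_or]
      · rw [if_neg hc]
        rw [ih _ _ hnd']
        simp only [List.mem_cons, hnm, false_or]

theorem get?_pass_default :
    ∀ (ms : List String) (d : PySem.Dict String String) (n : String), ms.Nodup →
      (ms.foldl (fun d m =>
          if !d.contains m then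
            let low := PySem.Str.lower m
            if PySem.Str.isIn "hep" low then d.insert m "HEP"
            else if PySem.Str.isIn "8" low then d.insert m "8B"
            else d.insert m m
          else d) d).get? n
        = if n ∈ ms ∧ d.contains n = false then some (pvDefault n) else d.get? n := by
  intro ms
  induction ms with
  | nil => intro d n _; simp
  | cons m ms ih =>
    intro d n hnd
    obtain ⟨hm, hnd'⟩ := List.nodup_cons.mp hnd
    simp only [List.foldl_cons]
    have hstep : (if !d.contains m then
            let low := PySem.Str.lower m
            if PySem.Str.isIn "hep" low then d.insert m "HEP"
            else if PySem.Str.isIn "8" low then d.insert m "8B"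
            else d.insert m m
          else d) = if d.contains m = false then d.insert m (pvDefault m) else d := by
      unfold pvDefault
      cases d.contains m <;> simp <;> split_ifs <;> rfl
    rw [hstep]
    by_cases hnm : n = m
    · subst hnm
      by_cases hc : d.contains n = false
      · simp only [hc, if_true]
        rw [ih _ _ hnd']
        simp [hm, PySem.Dict.get?_insert_self]
      · rw [if_neg hc]
        rw [ih _ _ hnd']
        simp [hm, hc]
    · by_cases hc : d.contains m = false
      · simp only [hc, if_true]
        rw [ih _ _ hnd']
        rw [PySem.Dict.get?_insert]
        have hcn : (d.insert m (pvDefault m)).contains n = d.contains n := by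
          rw [PySem.Dict.contains_insert]; simp [hnm]
        simp [hcn, if_neg hnm, List.mem_cons, hnm]
      · rw [if_neg hc]
        rw [ih _ _ hnd']
        simp [List.mem_cons, hnm]

theorem ofList_of_nodup_aux :
    ∀ (l s : List String), (∀ x ∈ l, x ∉ s) → l.Nodup → PySem.Set.update s l = s ++ l := by
  intro l
  induction l with
  | nil => intro s _ _; simp [PySem.Set.update]
  | cons n ns ih =>
    intro s hdisj hnd
    obtain ⟨hn, hnd'⟩ := List.nodup_cons.mp hnd
    have hstep : PySem.Set.update s (n :: ns) = PySem.Set.update (PySem.Set.add s n) ns := by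
      simp [PySem.Set.update]
    have hadd : PySem.Set.add s n = s ++ [n] := by
      simp [PySem.Set.add, PySem.Set.contains, hdisj n (by simp)]
    rw [hstep, hadd, ih (s ++ [n]) ?_ hnd']
    · simp
    · intro x hx
      simp only [List.mem_append, List.mem_singleton]
      rintro (h' | rfl)
      · exact hdisj x (by simp [hx]) h'
      · exact hn hx

theorem ofList_of_nodup (l : List String) (h : l.Nodup) : PySem.Set.ofList l = l := by
  have := ofList_of_nodup_aux l [] (by simp) h
  simpa [PySem.Set.update, PySem.Set.ofList_eq_foldl] using this

theorem filterMap_label_congr (f g : String → Option String) :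
    ∀ l : List String, (∀ x ∈ l, f x = g x) →
      l.filterMap (fun n => (f n).map (fun v => (n, v)))
        = l.filterMap (fun n => (g n).map (fun v => (n, v))) := by
  intro l
  induction l with
  | nil => intro _; rfl
  | cons x xs ih =>
    intro h
    simp only [List.filterMap_cons, h x (by simp)]
    rw [ih (fun y hy => h y (by simp [hy]))]

-- the value A's LAr loop leaves for one name: last matching basic name wins …
def pvLArScan (n : String) : Option String :=
  if PySem.Str.isIn "Rn22" n then some "Rn22X"
  else if PySem.Str.isIn "Po210" n then some "Po210"
  else if PySem.Str.isIn "Kr85" n then some "Kr85"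
  else if PySem.Str.isIn "Ar39" n then some "Ar39"
  else if PySem.Str.isIn "Ar42" n then some "Ar42"
  else none

-- … unless K42 overrides it
def pvLArLabel (n : String) : Option String :=
  if PySem.Str.isIn "K42" n then some "Ar42" else pvLArScan n

theorem basics_get? (lar : List String) (n : String) :
    (pvAssignBasics lar).get? n = if n ∈ lar then pvLArScan n else none := by
  unfold pvAssignBasics
  simp only [pvBasicNamesB, List.foldl_cons, List.foldl_nil, String.reduceBEq, reduceIte]
  rw [get?_pass_uncond, get?_pass_uncond, get?_pass_uncond, get?_pass_uncond,
    get?_pass_uncond, PySem.Dict.get?_empty]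
  by_cases hm : n ∈ lar <;> simp [pvLArScan, hm] <;> split_ifs <;> rfl

theorem k42_get? (lar : List String) (n : String) :
    (pvAssignK42 lar).get? n = if n ∈ lar then pvLArLabel n else none := by
  unfold pvAssignK42
  rw [get?_pass_uncond, basics_get?]
  by_cases hm : n ∈ lar <;> simp [pvLArLabel, hm] <;> split_ifs <;> rfl

theorem rules_get?_notmem (rules : List (String × String)) :
    ∀ (rest : List String) (d : PySem.Dict String String) (n : String), rest.Nodup →
      n ∉ rest →
      (rules.foldl (fun d r =>
        rest.foldl (fun d n =>
          if !d.contains n && PySem.Str.isIn r.1 n then d.insert n r.2 else d) d) d).get? n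
        = d.get? n := by
  induction rules with
  | nil => intro rest d n _ _; rfl
  | cons r rules ih =>
    intro rest d n hnd hm
    simp only [List.foldl_cons]
    rw [ih rest _ n hnd hm, get?_pass_guard r.1 r.2 rest d n hnd,
      if_neg (fun h => hm h.1)]

theorem rules_get?_mem (rules : List (String × String)) :
    ∀ (rest : List String) (d : PySem.Dict String String) (n : String), rest.Nodup →
      n ∈ rest →
      (rules.foldl (fun d r =>
        rest.foldl (fun d n =>
          if !d.contains n && PySem.Str.isIn r.1 n then d.insert n r.2 else d) d) d).get? n
        = if (d.get? n).isSome then d.get? n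
          else (rules.find? (fun r => PySem.Str.isIn r.1 n)).map (·.2) := by
  induction rules with
  | nil =>
    intro rest d n _ _
    cases h : d.get? n <;> simp [List.find?, h]
  | cons r rules ih =>
    intro rest d n hnd hm
    simp only [List.foldl_cons]
    rw [ih rest _ n hnd hm, get?_pass_guard r.1 r.2 rest d n hnd,
      PySem.Dict.contains_eq_isSome_get?]
    by_cases hv : (d.get? n).isSome = true
    · simp [hv, hm]
    · have hvf : (d.get? n).isSome = false := by simp_all
      by_cases hs : PySem.Str.isIn r.1 n = true <;>
        simp_all [List.find?_cons]

set_option maxHeartbeats 1000000 in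
theorem pvAssign_get? (order : List String) (hnd : order.Nodup) (n : String)
    (hn : n ∈ order) : (pvAssign order).get? n = pvLabel n := by
  have hrestnd : (order.filter (fun n => !PySem.Str.isIn "LAr" n)).Nodup := hnd.filter _
  have hmlar : n ∈ order.filter (fun n => PySem.Str.isIn "LAr" n)
      ↔ PySem.Str.isIn "LAr" n = true := by simp [List.mem_filter, hn]
  have hmrest : n ∈ order.filter (fun n => !PySem.Str.isIn "LAr" n)
      ↔ PySem.Str.isIn "LAr" n = false := by simp [List.mem_filter, hn]
  unfold pvAssign pvAssignDefault pvAssignRules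
  rw [get?_pass_default _ _ _ hrestnd]
  by_cases hL : PySem.Str.isIn "LAr" n = true
  · have hnr : n ∉ order.filter (fun n => !PySem.Str.isIn "LAr" n) := by
      rw [hmrest]
      exact fun h => by rw [hL] at h; cases h
    rw [if_neg (fun h => hnr h.1), rules_get?_notmem _ _ _ _ hrestnd hnr, k42_get?,
      if_pos (hmlar.mpr hL)]
    unfold pvLabel pvLArLabel pvLArScan
    simp only [hL, if_true]
  · have hLf : PySem.Str.isIn "LAr" n = false := by
      cases h : PySem.Str.isIn "LAr" n
      · rfl
      · exact absurd h hL
    have hnr : n ∈ order.filter (fun n => !PySem.Str.isIn "LAr" n) := hmrest.mpr hLf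
    have h2 : (pvAssignK42 (order.filter (fun n => PySem.Str.isIn "LAr" n))).get? n = none := by
      rw [k42_get?, if_neg (fun hm => by rw [hmlar] at hm; rw [hm] at hLf; cases hLf)]
    rw [PySem.Dict.contains_eq_isSome_get?, rules_get?_mem _ _ _ _ hrestnd hnr, h2]
    simp only [Option.isSome_none, Bool.false_eq_true, if_false]
    unfold pvLabel pvDefault
    simp only [hLf, Bool.false_eq_true, if_false, hnr, true_and]
    simp only [pvRules, List.find?_cons]
    by_cases hG : PySem.Str.isIn "Gamma" n = true
    · simp_all
    by_cases hN : PySem.Str.isIn "Neutron" n = true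
    · simp_all
    by_cases hC : PySem.Str.isIn "CPA" n = true
    · simp_all
    by_cases hCa : PySem.Str.isIn "Cathode" n = true
    · simp_all
    by_cases hCr : PySem.Str.isIn "CRP" n = true
    · simp_all
    by_cases hA : PySem.Str.isIn "APA" n = true
    · simp_all
    by_cases hP : PySem.Str.isIn "PDS" n = true
    · simp_all
    by_cases hH : PySem.Str.isIn "hep" (PySem.Str.lower n) = true
    · simp_all
    by_cases h8 : PySem.Str.isIn "8" (PySem.Str.lower n) = true <;>
      simp_all

-- ===== VERDICT (by name: the statement is the Claim_ definition above) =====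
theorem get_simple_names_spec : Claim_equal_get_simple_names := by
  intro names debug _
  unfold Spec_get_simple_names get_simple_names get_simple_names_alt
  have hA : names.foldl pvStepA PySem.Dict.empty
      = names.foldl (fun d n => match pvLabel n with
          | some v => d.insert n v
          | none => d) PySem.Dict.empty :=
    PySem.List.foldl_congr_mem _ _ _ _ (fun acc x _ => pvStepA_eq_label acc x)
  rw [hA]
  have hupd : ∀ (f : String → Option String) (ns : List String),
      (ns.foldl (fun d n => match f n with
        | some v => d.insert n v
        | none => d) PySem.Dict.empty).items
      = (PySem.Set.ofList ns).filterMap (fun n => (f n).map (fun v => (n, v))) := by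
    intro f ns
    rw [items_foldl_upd f ns PySem.Dict.empty [] PySem.Dict.nodup_keys_empty
      (by simp [PySem.Dict.contains_empty]) (by simp [PySem.Dict.get?_empty])]
    rw [canonGo_eq]
    simp [PySem.Set.update, PySem.Set.ofList_eq_foldl, PySem.Dict.items, PySem.Dict.empty]
  rw [hupd pvLabel names]
  rw [hupd (fun n => (pvAssign (PySem.List.dedup names)).get? n) (PySem.List.dedup names)]
  have hnodup : (PySem.List.dedup names).Nodup := PySem.List.nodup_dedup names
  rw [ofList_of_nodup _ hnodup]
  rw [filterMap_label_congr (fun n => (pvAssign (PySem.List.dedup names)).get? n) pvLabel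
    (PySem.List.dedup names) (fun x hx => pvAssign_get? _ hnodup x hx)]
  rw [PySem.List.dedup_eq_ofList]
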